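-- pv_equiv track=rewrite | github.com/thiagomout/trabalho-grafos | biblioteca1.py | dfs_lista
-- ===== SOURCE A (Python) =====
-- def dfs_lista(adj, s):
--     n = len(adj) - 1
--     pai = [-1]*(n+1)
--     nivel = [-1]*(n+1)
--     cor = [0]*(n+1)  # 0 branco, 1 cinza, 2 preto
--     pilha = [(s, 0)]
--     nivel[s] = 0; cor[s] = 1
--     while pilha:
--         u, it = pilha.pop()
--         if it < len(adj[u]):
--             v = adj[u][it]
--             pilha.append((u, it+1))
--             if cor[v] == 0:
--                 cor[v] = 1
--                 pai[v] = u
--                 nivel[v] = nivel[u] + 1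
--                 pilha.append((v, 0))
--         else:
--             cor[u] = 2
--     return pai, nivel
-- ===== SOURCE B (Python) =====
-- def dfs_lista(adj, s):
--     # Recursive DFS (same discovery order as the stack version: neighbors in index order).
--     pai = [-1] * len(adj)
--     nivel = [-1] * len(adj)
--     vis = [False] * len(adj)
--     nivel[s] = 0
--     vis[s] = True
--
--     def visit(u):
--         for v in adj[u]:
--             if not vis[v]:
--                 vis[v] = True
--                 pai[v] = u
--                 nivel[v] = nivel[u] + 1
--                 visit(v)
--
--     visit(s)
--     return pai, nivel
-- ===== Notes on version B (the rewrite author's own statement) =====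
-- stated objective: alternative
-- what changed: Replaces the explicit stack of (vertex, iterator-index) frames by a recursive visit helper that walks each adjacency list structurally and recurses into unvisited neighbors, tracking visited with a boolean array instead of a 3-color int array.
import Mathlib
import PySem

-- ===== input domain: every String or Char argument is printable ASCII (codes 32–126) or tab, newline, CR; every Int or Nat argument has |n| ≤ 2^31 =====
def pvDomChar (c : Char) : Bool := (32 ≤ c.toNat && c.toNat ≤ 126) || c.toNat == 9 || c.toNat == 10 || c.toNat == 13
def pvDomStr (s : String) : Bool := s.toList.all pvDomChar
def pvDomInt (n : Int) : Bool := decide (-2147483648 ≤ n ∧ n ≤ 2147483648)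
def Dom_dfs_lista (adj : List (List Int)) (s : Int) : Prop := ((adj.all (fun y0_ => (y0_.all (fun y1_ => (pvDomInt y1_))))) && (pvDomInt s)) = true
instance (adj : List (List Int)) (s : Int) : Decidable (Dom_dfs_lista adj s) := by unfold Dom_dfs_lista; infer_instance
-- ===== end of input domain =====

-- B replaces A's explicit stack of (vertex, iterator-index) frames and 3-color int array by a
-- recursive visit helper over each adjacency list with a boolean visited array (objective: alternative).

-- ===== PORT A =====
-- measure helpers cited by dfsA's termination proof
def whites (cor : List Int) : Nat := cor.countP (fun c => c == 0)
def degMax (adj : List (List Int)) : Nat := adj.foldr (fun l m => max l.length m) 0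
def frameW (adj : List (List Int)) (p : Int × Nat) : Nat :=
  ((PySem.List.pyGetD adj p.1 ([] : List Int)).length - p.2) + 1
def stackW (adj : List (List Int)) (pilha : List (Int × Nat)) : Nat :=
  (pilha.map (frameW adj)).sum

-- canonical (wrapped) index, matching PySem.List.pyIdx?
def nidx (L : Nat) (i : Int) : Nat := if 0 ≤ i then i.toNat else L - (-i).toNat

theorem pyIdx?_inrange (L : Nat) (i : Int) (h1 : -(L:Int) ≤ i) (h2 : i < L) :
    PySem.List.pyIdx? L i = some (nidx L i) := by
  simp only [PySem.List.pyIdx?, nidx]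
  split_ifs <;> rfl

theorem nidx_lt (L : Nat) (i : Int) (h1 : -(L:Int) ≤ i) (h2 : i < L) : nidx L i < L := by
  simp only [nidx]; split_ifs with h0 <;> omega

theorem pyGet?_inrange {α : Type} (xs : List α) (i : Int)
    (h1 : -(xs.length:Int) ≤ i) (h2 : i < xs.length) :
    PySem.List.pyGet? xs i = some (xs[nidx xs.length i]'(nidx_lt _ _ h1 h2)) := by
  simp only [PySem.List.pyGet?, pyIdx?_inrange _ _ h1 h2, Option.bind_some,
    List.getElem?_eq_getElem (nidx_lt _ _ h1 h2)]

theorem pySetD_inrange {α : Type} (xs : List α) (i : Int) (v : α)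
    (h1 : -(xs.length:Int) ≤ i) (h2 : i < xs.length) :
    PySem.List.pySetD xs i v = xs.set (nidx xs.length i) v := by
  simp only [PySem.List.pySetD, PySem.List.pySet?, pyIdx?_inrange _ _ h1 h2,
    Option.map_some, Option.getD_some]

theorem pySetD_outrange {α : Type} (xs : List α) (i : Int) (v : α)
    (h : ¬(-(xs.length:Int) ≤ i ∧ i < xs.length)) :
    PySem.List.pySetD xs i v = xs := by
  simp only [PySem.List.pySetD, PySem.List.pySet?, PySem.List.pyIdx?]
  split_ifs <;> simp_all <;> omega

theorem whites_pySetD_le (cor : List Int) (i : Int) (v : Int) (hv : v ≠ 0) :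
    whites (PySem.List.pySetD cor i v) ≤ whites cor := by
  by_cases h : -(cor.length:Int) ≤ i ∧ i < cor.length
  · rw [pySetD_inrange cor i v h.1 h.2]
    rw [whites, whites, List.countP_set (nidx_lt _ _ h.1 h.2)]
    simp [hv]
  · rw [pySetD_outrange cor i v h]

theorem whites_pySetD_lt (cor : List Int) (i : Int) (v : Int) (hv : v ≠ 0)
    (h0 : PySem.List.pyGet? cor i = some 0) :
    whites (PySem.List.pySetD cor i v) < whites cor := by
  have hin : -(cor.length:Int) ≤ i ∧ i < cor.length := by
    by_contra h
    rw [(PySem.List.pyGet?_eq_none_iff cor i).2 (by exact fun hc => h hc)] at h0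
    exact Option.some_ne_none 0 h0.symm
  have hg := pyGet?_inrange cor i hin.1 hin.2
  rw [h0] at hg
  have hz : cor[nidx cor.length i]'(nidx_lt _ _ hin.1 hin.2) = 0 := by
    injection hg with hg; omega
  rw [pySetD_inrange cor i v hin.1 hin.2]
  rw [whites, whites, List.countP_set (nidx_lt _ _ hin.1 hin.2)]
  simp [hv, hz]
  have hm := List.getElem_mem (nidx_lt _ _ hin.1 hin.2)
  rw [hz] at hm
  exact hm

theorem pyGetD_len_le_degMax (adj : List (List Int)) (u : Int) :
    (PySem.List.pyGetD adj u ([] : List Int)).length ≤ degMax adj := by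
  rcases hg : PySem.List.pyGet? adj u with _ | l
  · simp [PySem.List.pyGetD, hg]
  · have hmem := PySem.List.mem_of_pyGet?_eq_some adj hg
    simp only [PySem.List.pyGetD, hg, Option.getD_some]
    clear hg
    induction adj with
    | nil => cases hmem
    | cons a as ih =>
      simp only [degMax, List.foldr] at ih ⊢
      rcases List.mem_cons.1 hmem with h | h
      · subst h; omega
      · have := ih h; omega

def vAt (adj : List (List Int)) (u : Int) (it : Nat) : Int :=
  PySem.List.pyGetD (PySem.List.pyGetD adj u []) (it : Int) 0

def dfsA (adj : List (List Int)) (pilha : List (Int × Nat))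
    (pai nivel cor : List Int) : List Int × List Int :=
  match pilha with
  | [] => (pai, nivel)
  | (u, it) :: rest =>
    if hit : it < (PySem.List.pyGetD adj u ([] : List Int)).length then
      match hv : PySem.List.pyGet? cor (vAt adj u it) with
      | none => (pai, nivel)  -- Python raises IndexError on cor[v] here (excluded by Pre_)
      | some c =>
        if hc : c = 0 then
          dfsA adj ((vAt adj u it, 0) :: (u, it + 1) :: rest)
            (PySem.List.pySetD pai (vAt adj u it) u)
            (PySem.List.pySetD nivel (vAt adj u it) (PySem.List.pyGetD nivel u 0 + 1))
            (PySem.List.pySetD cor (vAt adj u it) 1)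
        else
          dfsA adj ((u, it + 1) :: rest) pai nivel cor
    else
      dfsA adj rest pai nivel (PySem.List.pySetD cor u 2)
termination_by whites cor * (degMax adj + 1) + stackW adj pilha
decreasing_by
  · -- discover: v was white, becomes gray; frame (v,0) pushed
    have hw : whites (PySem.List.pySetD cor (vAt adj u it) 1) < whites cor :=
      whites_pySetD_lt cor (vAt adj u it) 1 (by omega) (hc ▸ hv)
    have hd : (PySem.List.pyGetD adj (vAt adj u it) ([] : List Int)).length ≤ degMax adj :=
      pyGetD_len_le_degMax adj (vAt adj u it)
    simp only [stackW, List.map_cons, List.sum_cons, frameW]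
    have h1 : whites (PySem.List.pySetD cor (vAt adj u it) 1) * (degMax adj + 1) + (degMax adj + 1)
        ≤ whites cor * (degMax adj + 1) := by
      have hle := Nat.succ_le_of_lt hw
      calc whites (PySem.List.pySetD cor (vAt adj u it) 1) * (degMax adj + 1) + (degMax adj + 1)
          = (whites (PySem.List.pySetD cor (vAt adj u it) 1) + 1) * (degMax adj + 1) := by ring
        _ ≤ whites cor * (degMax adj + 1) := Nat.mul_le_mul_right _ hle
    omega
  · -- skip: iterator advances
    simp only [stackW, List.map_cons, List.sum_cons, frameW]
    omega
  · -- pop: frame finished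
    have hw : whites (PySem.List.pySetD cor u 2) ≤ whites cor :=
      whites_pySetD_le cor u 2 (by omega)
    have h1 : whites (PySem.List.pySetD cor u 2) * (degMax adj + 1)
        ≤ whites cor * (degMax adj + 1) := Nat.mul_le_mul_right _ hw
    simp only [stackW, List.map_cons, List.sum_cons, frameW]
    omega

-- A's n = len(adj)-1 and arrays [-1]*(n+1): n+1 = len(adj) (also when adj = [])
def dfs_lista (adj : List (List Int)) (s : Int) : List Int × List Int :=
  let pai := List.replicate adj.length (-1 : Int)
  let nivel := PySem.List.pySetD (List.replicate adj.length (-1 : Int)) s 0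
  let cor := PySem.List.pySetD (List.replicate adj.length (0 : Int)) s 1
  dfsA adj [(s, 0)] pai nivel cor

-- ===== PORT B =====
def bfalses (vis : List Bool) : Nat := vis.countP (fun b => !b)

theorem bfalses_pySetD_lt (vis : List Bool) (i : Int)
    (h0 : PySem.List.pyGet? vis i = some false) :
    bfalses (PySem.List.pySetD vis i true) < bfalses vis := by
  have hin : -(vis.length:Int) ≤ i ∧ i < vis.length := by
    by_contra h
    rw [(PySem.List.pyGet?_eq_none_iff vis i).2 (by exact fun hc => h hc)] at h0
    exact Option.some_ne_none false h0.symm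
  have hg := pyGet?_inrange vis i hin.1 hin.2
  rw [h0] at hg
  have hz : vis[nidx vis.length i]'(nidx_lt _ _ hin.1 hin.2) = false := by
    injection hg with hg; exact hg.symm
  rw [pySetD_inrange vis i true hin.1 hin.2]
  rw [bfalses, bfalses, List.countP_set (nidx_lt _ _ hin.1 hin.2)]
  simp [hz]
  have hm := List.getElem_mem (nidx_lt _ _ hin.1 hin.2)
  rw [hz] at hm
  exact hm

-- the state (pai, nivel, vis); visit carries the invariant that it never unmarks a vertex
def visitB (adj : List (List Int)) (u : Int) (vs : List Int)
    (st : List Int × List Int × List Bool) :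
    {r : List Int × List Int × List Bool // bfalses r.2.2 ≤ bfalses st.2.2} :=
  match vs with
  | [] => ⟨st, Nat.le_refl _⟩
  | v :: rest =>
    match hv : PySem.List.pyGet? st.2.2 v with
    | none => ⟨st, Nat.le_refl _⟩  -- Python raises IndexError on vis[v] here (excluded by Pre_)
    | some true => visitB adj u rest st
    | some false =>
      let st' : List Int × List Int × List Bool :=
        (PySem.List.pySetD st.1 v u,
         PySem.List.pySetD st.2.1 v (PySem.List.pyGetD st.2.1 u 0 + 1),
         PySem.List.pySetD st.2.2 v true)
      let r1 := visitB adj v (PySem.List.pyGetD adj v []) st'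
      let r2 := visitB adj u rest r1.val
      ⟨r2.val, le_trans r2.property (le_trans r1.property (le_of_lt (bfalses_pySetD_lt st.2.2 v hv)))⟩
termination_by (bfalses st.2.2, vs.length)
decreasing_by
  · exact Prod.Lex.right _ (Nat.lt_succ_of_le (Nat.le_refl _))
  · exact Prod.Lex.left _ _ (bfalses_pySetD_lt st.2.2 v hv)
  · exact Prod.Lex.left _ _
      (Nat.lt_of_le_of_lt r1.property (bfalses_pySetD_lt st.2.2 v hv))

def dfs_lista_alt (adj : List (List Int)) (s : Int) : List Int × List Int :=
  let pai := List.replicate adj.length (-1 : Int)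
  let nivel := PySem.List.pySetD (List.replicate adj.length (-1 : Int)) s 0
  let vis := PySem.List.pySetD (List.replicate adj.length false) s true
  let r := visitB adj s (PySem.List.pyGetD adj s []) (pai, nivel, vis)
  (r.val.1, r.val.2.1)

-- ===== PRECONDITION & SPEC =====
-- Pre_ helpers: the set of vertices A's traversal reaches, as an iterated closure over
-- the in-range edges (this is a property of the graph, not a re-run of either port).
def nbrs (adj : List (List Int)) (u : Nat) : Finset Nat :=
  ((adj.getD u []).filterMap (fun v =>
    if -(adj.length:Int) ≤ v ∧ v < adj.length then some (nidx adj.length v) else none)).toFinset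

def stepR (adj : List (List Int)) (S : Finset Nat) : Finset Nat :=
  S ∪ S.biUnion (nbrs adj)

def reachSet (adj : List (List Int)) (s : Int) : Finset Nat :=
  (stepR adj)^[adj.length] {nidx adj.length s}

-- A raises IndexError exactly when s, or a neighbor listed at some vertex its DFS reaches,
-- lies outside [-len(adj), len(adj)); Pre_ admits exactly the inputs where A returns.
def Pre_dfs_lista (adj : List (List Int)) (s : Int) : Prop :=
  (-(adj.length:Int) ≤ s ∧ s < adj.length) ∧
  ∀ u ∈ reachSet adj s, ∀ v ∈ adj.getD u [], -(adj.length:Int) ≤ v ∧ v < adj.length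

instance (adj : List (List Int)) (s : Int) : Decidable (Pre_dfs_lista adj s) := by
  unfold Pre_dfs_lista; infer_instance

def pvWitness_dfs_lista : List (List Int) × Int := ([[1, 2], [0], [2, -3]], 0)

def Spec_dfs_lista (adj : List (List Int)) (s : Int) (out : List Int × List Int) : Prop :=
  out = dfs_lista_alt adj s
instance (adj : List (List Int)) (s : Int) (out : List Int × List Int) :
    Decidable (Spec_dfs_lista adj s out) := by unfold Spec_dfs_lista; infer_instance

-- ===== CLAIM (what is proved, stated in full; the proofs are below) =====
def Claim_equal_dfs_lista : Prop := ∀ (adj : List (List Int)) (s : Int),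
  Dom_dfs_lista adj s → Pre_dfs_lista adj s → Spec_dfs_lista adj s (dfs_lista adj s)

-- ===== LEMMAS AND PROOFS =====

-- generic bridges -------------------------------------------------------------

theorem pyGet?_map {a b : Type} (g : a → b) (xs : List a) (i : Int) :
    PySem.List.pyGet? (xs.map g) i = (PySem.List.pyGet? xs i).map g := by
  simp only [PySem.List.pyGet?, List.length_map]
  cases PySem.List.pyIdx? xs.length i <;> simp

theorem pySetD_map {a b : Type} (g : a → b) (xs : List a) (i : Int) (v : a) :
    PySem.List.pySetD (xs.map g) i (g v) = (PySem.List.pySetD xs i v).map g := by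
  simp only [PySem.List.pySetD, PySem.List.pySet?, List.length_map]
  cases PySem.List.pyIdx? xs.length i <;> simp [List.map_set]

theorem pyGetD_inrange {a : Type} (xs : List a) (i : Int) (d : a)
    (h1 : -(xs.length:Int) ≤ i) (h2 : i < xs.length) :
    PySem.List.pyGetD xs i d = xs.getD (nidx xs.length i) d := by
  rw [PySem.List.pyGetD, pyGet?_inrange xs i h1 h2, Option.getD_some,
    List.getD_eq_getElem xs d (nidx_lt _ _ h1 h2)]

theorem pyGet?_inrange_getD {a : Type} (xs : List a) (i : Int) (d : a)
    (h1 : -(xs.length:Int) ≤ i) (h2 : i < xs.length) :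
    PySem.List.pyGet? xs i = some (xs.getD (nidx xs.length i) d) := by
  rw [pyGet?_inrange xs i h1 h2, List.getD_eq_getElem xs d (nidx_lt _ _ h1 h2)]

theorem getD_set {a : Type} (xs : List a) (n k : Nat) (v d : a) :
    (xs.set n v).getD k d = if n = k ∧ n < xs.length then v else xs.getD k d := by
  rw [List.getD_eq_getElem?_getD, List.getD_eq_getElem?_getD, List.getElem?_set]
  by_cases h1 : n = k
  · subst h1
    by_cases h2 : n < xs.length <;> simp [h2]
  · simp [h1]

theorem whites_mono : ∀ (cor cor2 : List Int), cor2.length = cor.length →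
    (∀ k : Nat, cor.getD k 0 ≠ 0 → cor2.getD k 0 ≠ 0) → whites cor2 ≤ whites cor := by
  intro cor
  induction cor with
  | nil =>
    intro cor2 hl _
    rw [List.length_nil, List.length_eq_zero_iff] at hl
    subst hl; exact Nat.le_refl _
  | cons x xs ih =>
    intro cor2 hl hp
    rcases cor2 with _ | ⟨y, ys⟩
    · exact Nat.zero_le _
    · have h0 := hp 0
      have htail := fun k => hp (k + 1)
      simp only [List.getD_cons_zero] at h0
      simp only [List.getD_cons_succ] at htail
      have hys := ih ys (by simpa using hl) htail
      simp only [whites] at hys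
      simp only [whites, List.countP_cons]
      by_cases hx : x = 0
      · subst hx
        rw [if_pos (show ((0:Int) == 0) = true by decide)]
        split_ifs <;> omega
      · have hy : y ≠ 0 := h0 hx
        have hbx : ((x == 0) : Bool) = false := by simp [hx]
        have hby : ((y == 0) : Bool) = false := by simp [hy]
        rw [hbx, hby]
        simpa using hys

-- step lemmas for the two ports ------------------------------------------------

theorem dfsA_nil (adj : List (List Int)) (pai nivel cor : List Int) :
    dfsA adj [] pai nivel cor = (pai, nivel) := by
  rw [dfsA]

theorem dfsA_pop (adj : List (List Int)) (u : Int) (it : Nat) (rest : List (Int × Nat))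
    (pai nivel cor : List Int)
    (h : ¬ it < (PySem.List.pyGetD adj u ([] : List Int)).length) :
    dfsA adj ((u,it)::rest) pai nivel cor
      = dfsA adj rest pai nivel (PySem.List.pySetD cor u 2) := by
  rw [dfsA]; simp [h]

theorem dfsA_disc (adj : List (List Int)) (u : Int) (it : Nat) (rest : List (Int × Nat))
    (pai nivel cor : List Int)
    (hit : it < (PySem.List.pyGetD adj u ([] : List Int)).length)
    (hv : PySem.List.pyGet? cor (vAt adj u it) = some 0) :
    dfsA adj ((u,it)::rest) pai nivel cor =
      dfsA adj ((vAt adj u it, 0) :: (u, it + 1) :: rest)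
        (PySem.List.pySetD pai (vAt adj u it) u)
        (PySem.List.pySetD nivel (vAt adj u it) (PySem.List.pyGetD nivel u 0 + 1))
        (PySem.List.pySetD cor (vAt adj u it) 1) := by
  rw [dfsA]; rw [dif_pos hit]; split <;> simp_all

theorem dfsA_skip (adj : List (List Int)) (u : Int) (it : Nat) (rest : List (Int × Nat))
    (pai nivel cor : List Int) (c : Int)
    (hit : it < (PySem.List.pyGetD adj u ([] : List Int)).length)
    (hv : PySem.List.pyGet? cor (vAt adj u it) = some c) (hc : c ≠ 0) :
    dfsA adj ((u,it)::rest) pai nivel cor = dfsA adj ((u, it+1)::rest) pai nivel cor := by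
  rw [dfsA]; rw [dif_pos hit]; split <;> simp_all

theorem visitB_nil (adj : List (List Int)) (u : Int) (st : List Int × List Int × List Bool) :
    (visitB adj u [] st).val = st := by
  rw [visitB]

theorem visitB_cons_true (adj : List (List Int)) (u v : Int) (rest : List Int)
    (st : List Int × List Int × List Bool)
    (hv : PySem.List.pyGet? st.2.2 v = some true) :
    (visitB adj u (v::rest) st).val = (visitB adj u rest st).val := by
  rw [visitB]; split <;> simp_all

theorem visitB_cons_false (adj : List (List Int)) (u v : Int) (rest : List Int)
    (st : List Int × List Int × List Bool)
    (hv : PySem.List.pyGet? st.2.2 v = some false) :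
    (visitB adj u (v::rest) st).val =
      (visitB adj u rest (visitB adj v (PySem.List.pyGetD adj v [])
        (PySem.List.pySetD st.1 v u,
         PySem.List.pySetD st.2.1 v (PySem.List.pyGetD st.2.1 u 0 + 1),
         PySem.List.pySetD st.2.2 v true)).val).val := by
  rw [visitB]; split <;> simp_all

-- B's visited array as the image of A's color array ----------------------------

def visMap (cor : List Int) : List Bool := cor.map (fun c => !(c == 0))

theorem pyGet?_visMap (cor : List Int) (i : Int) :
    PySem.List.pyGet? (visMap cor) i = (PySem.List.pyGet? cor i).map (fun c => !(c == 0)) :=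
  pyGet?_map _ cor i

-- the reachable-set closure ----------------------------------------------------

theorem mem_nbrs (adj : List (List Int)) (u : Nat) (v : Int)
    (hv : v ∈ adj.getD u []) (hr : -(adj.length:Int) ≤ v ∧ v < adj.length) :
    nidx adj.length v ∈ nbrs adj u := by
  simp only [nbrs, List.mem_toFinset, List.mem_filterMap]
  exact ⟨v, hv, by rw [if_pos hr]⟩

theorem nbrs_subset_range (adj : List (List Int)) (u : Nat) :
    nbrs adj u ⊆ Finset.range adj.length := by
  intro k hk
  simp only [nbrs, List.mem_toFinset, List.mem_filterMap] at hk
  obtain ⟨v, _, hv⟩ := hk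
  by_cases h : -(adj.length:Int) ≤ v ∧ v < adj.length
  · rw [if_pos h] at hv
    injection hv with hv
    subst hv
    rw [Finset.mem_range]
    exact nidx_lt _ _ h.1 h.2
  · rw [if_neg h] at hv; cases hv

theorem subset_stepR (adj : List (List Int)) (S : Finset Nat) : S ⊆ stepR adj S :=
  Finset.subset_union_left

theorem stepR_subset_range (adj : List (List Int)) (S : Finset Nat)
    (h : S ⊆ Finset.range adj.length) : stepR adj S ⊆ Finset.range adj.length := by
  apply Finset.union_subset h
  intro k hk
  rw [Finset.mem_biUnion] at hk
  obtain ⟨u, _, hu⟩ := hk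
  exact nbrs_subset_range adj u hu

theorem iterate_subset_range (adj : List (List Int)) (S : Finset Nat)
    (h : S ⊆ Finset.range adj.length) (k : Nat) :
    (stepR adj)^[k] S ⊆ Finset.range adj.length := by
  induction k with
  | zero => exact h
  | succ k ih =>
    rw [Function.iterate_succ_apply']
    exact stepR_subset_range adj _ ih

theorem iterate_fix (adj : List (List Int)) (S : Finset Nat)
    (h : stepR adj S = S) : ∀ k, (stepR adj)^[k] S = S := by
  intro k
  induction k with
  | zero => rfl
  | succ k ih => rw [Function.iterate_succ_apply', ih, h]

theorem subset_iterate (adj : List (List Int)) (S : Finset Nat) (k : Nat) :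
    S ⊆ (stepR adj)^[k] S := by
  induction k with
  | zero => exact Finset.Subset.refl S
  | succ k ih =>
    rw [Function.iterate_succ_apply']
    exact ih.trans (subset_stepR adj _)

theorem card_growth (adj : List (List Int)) (S : Finset Nat) :
    ∀ k, (∃ j, j < k ∧ stepR adj ((stepR adj)^[j] S) = (stepR adj)^[j] S) ∨
      k + S.card ≤ ((stepR adj)^[k] S).card := by
  intro k
  induction k with
  | zero => right; simp
  | succ k ih =>
    rcases ih with ⟨j, hj, hfix⟩ | hcard
    · exact Or.inl ⟨j, Nat.lt_succ_of_lt hj, hfix⟩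
    · by_cases hfix : stepR adj ((stepR adj)^[k] S) = (stepR adj)^[k] S
      · exact Or.inl ⟨k, Nat.lt_succ_self k, hfix⟩
      · right
        have hss : (stepR adj)^[k] S ⊂ (stepR adj)^[k+1] S := by
          rw [Function.iterate_succ_apply']
          exact Finset.ssubset_iff_subset_ne.2 ⟨subset_stepR adj _, fun h => hfix h.symm⟩
        have := Finset.card_lt_card hss
        omega

theorem reachSet_closed (adj : List (List Int)) (s : Int)
    (hs : -(adj.length:Int) ≤ s ∧ s < adj.length) :
    stepR adj (reachSet adj s) = reachSet adj s := by
  set S0 : Finset Nat := {nidx adj.length s} with hS0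
  rcases card_growth adj S0 adj.length with ⟨j, hj, hfix⟩ | hcard
  · have hd : adj.length = (adj.length - j) + j := by omega
    have h1 : (stepR adj)^[adj.length] S0 = (stepR adj)^[j] S0 := by
      rw [hd, Function.iterate_add_apply]
      exact iterate_fix adj _ hfix _
    rw [reachSet, ← hS0, h1, hfix]
  · exfalso
    have hsub : S0 ⊆ Finset.range adj.length := by
      intro k hk
      rw [hS0, Finset.mem_singleton] at hk
      rw [Finset.mem_range]
      exact hk ▸ nidx_lt _ _ hs.1 hs.2
    have h2 := Finset.card_le_card (iterate_subset_range adj _ hsub adj.length)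
    rw [Finset.card_range] at h2
    have h3 : S0.card = 1 := by rw [hS0]; exact Finset.card_singleton _
    omega

theorem mem_reachSet_self (adj : List (List Int)) (s : Int) :
    nidx adj.length s ∈ reachSet adj s :=
  subset_iterate adj _ adj.length (Finset.mem_singleton_self _)

theorem reachSet_next (adj : List (List Int)) (s : Int)
    (hs : -(adj.length:Int) ≤ s ∧ s < adj.length)
    (u : Nat) (hu : u ∈ reachSet adj s) (v : Int) (hv : v ∈ adj.getD u [])
    (hr : -(adj.length:Int) ≤ v ∧ v < adj.length) :
    nidx adj.length v ∈ reachSet adj s := by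
  rw [← reachSet_closed adj s hs]
  apply Finset.mem_union_right
  rw [Finset.mem_biUnion]
  exact ⟨u, hu, mem_nbrs adj u v hv hr⟩

-- the simulation ---------------------------------------------------------------

theorem pop_case (adj : List (List Int)) (pai nivel cor : List Int) (u : Int) (it : Nat)
    (rest : List (Int × Nat))
    (hit : ¬ it < (PySem.List.pyGetD adj u ([]:List Int)).length)
    (hlen : cor.length = adj.length)
    (hu : -(adj.length:Int) ≤ u ∧ u < adj.length)
    (hgray : cor.getD (nidx adj.length u) 0 ≠ 0) :
    ∃ cor2 : List Int,
      dfsA adj ((u, it) :: rest) pai nivel cor =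
        dfsA adj rest
          (visitB adj u ((PySem.List.pyGetD adj u ([]:List Int)).drop it) (pai, nivel, visMap cor)).val.1
          (visitB adj u ((PySem.List.pyGetD adj u ([]:List Int)).drop it) (pai, nivel, visMap cor)).val.2.1
          cor2 ∧
      visMap cor2 = (visitB adj u ((PySem.List.pyGetD adj u ([]:List Int)).drop it) (pai, nivel, visMap cor)).val.2.2 ∧
      cor2.length = cor.length ∧
      (∀ k : Nat, cor.getD k 0 ≠ 0 → cor2.getD k 0 ≠ 0) := by
  have hu1 : -(cor.length:Int) ≤ u := by rw [hlen]; exact hu.1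
  have hu2 : u < (cor.length:Int) := by rw [hlen]; exact hu.2
  have hnn : nidx cor.length u = nidx adj.length u := by rw [hlen]
  have hklt : nidx adj.length u < cor.length := by rw [hlen]; exact nidx_lt _ _ hu.1 hu.2
  have hvm : visMap (PySem.List.pySetD cor u 2) = visMap cor := by
    rw [pySetD_inrange cor u 2 hu1 hu2, hnn, visMap, List.map_set,
      show (!( (2:Int) == 0)) = true by decide]
    have hgetm : (cor.map (fun c => !(c == 0)))[nidx adj.length u]'(by
        rw [List.length_map]; exact hklt) = true := by
      rw [List.getElem_map]
      have hge := List.getD_eq_getElem cor 0 hklt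
      rw [← hge] at *
      simp only [Bool.not_eq_eq_eq_not, Bool.not_true]
      simpa using hgray
    conv_lhs => rw [← hgetm]
    exact List.set_getElem_self _
  refine ⟨PySem.List.pySetD cor u 2, ?_, ?_, ?_, ?_⟩
  · rw [dfsA_pop adj u it rest pai nivel cor hit,
      List.drop_eq_nil_of_le (Nat.le_of_not_lt hit), visitB_nil]
  · rw [List.drop_eq_nil_of_le (Nat.le_of_not_lt hit), visitB_nil, hvm]
  · rw [pySetD_inrange cor u 2 hu1 hu2, List.length_set]
  · intro k hk
    rw [pySetD_inrange cor u 2 hu1 hu2, getD_set]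
    split_ifs with h
    · norm_num
    · exact hk

theorem main_sim (adj : List (List Int)) (R : Finset Nat)
    (hR1 : ∀ u ∈ R, ∀ v ∈ adj.getD u [], -(adj.length:Int) ≤ v ∧ v < adj.length)
    (hR2 : ∀ u ∈ R, ∀ v ∈ adj.getD u [], (-(adj.length:Int) ≤ v ∧ v < adj.length) → nidx adj.length v ∈ R) :
    ∀ (m : Nat) (pai nivel cor : List Int) (u : Int) (it : Nat) (rest : List (Int × Nat)),
      whites cor * (degMax adj + 1) + ((PySem.List.pyGetD adj u ([]:List Int)).length - it) ≤ m →
      cor.length = adj.length →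
      (-(adj.length:Int) ≤ u ∧ u < adj.length) →
      nidx adj.length u ∈ R →
      cor.getD (nidx adj.length u) 0 ≠ 0 →
      ∃ cor2 : List Int,
        dfsA adj ((u, it) :: rest) pai nivel cor =
          dfsA adj rest
            (visitB adj u ((PySem.List.pyGetD adj u ([]:List Int)).drop it) (pai, nivel, visMap cor)).val.1
            (visitB adj u ((PySem.List.pyGetD adj u ([]:List Int)).drop it) (pai, nivel, visMap cor)).val.2.1
            cor2 ∧
        visMap cor2 = (visitB adj u ((PySem.List.pyGetD adj u ([]:List Int)).drop it) (pai, nivel, visMap cor)).val.2.2 ∧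
        cor2.length = cor.length ∧
        (∀ k : Nat, cor.getD k 0 ≠ 0 → cor2.getD k 0 ≠ 0) := by
  intro m
  induction m with
  | zero =>
    intro pai nivel cor u it rest hm hlen hu huR hgray
    exact pop_case adj pai nivel cor u it rest (by omega) hlen hu hgray
  | succ m ih =>
    intro pai nivel cor u it rest hm hlen hu huR hgray
    by_cases hit : it < (PySem.List.pyGetD adj u ([]:List Int)).length
    case neg => exact pop_case adj pai nivel cor u it rest hit hlen hu hgray
    case pos =>
    have hu1c : -(cor.length:Int) ≤ u := by rw [hlen]; exact hu.1
    have hu2c : u < (cor.length:Int) := by rw [hlen]; exact hu.2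
    have hluG : PySem.List.pyGetD adj u ([]:List Int) = adj.getD (nidx adj.length u) [] :=
      pyGetD_inrange adj u [] hu.1 hu.2
    have hvdef : vAt adj u it = (PySem.List.pyGetD adj u ([]:List Int)).getD it 0 := by
      rw [vAt, PySem.List.pyGetD_natCast]
    have hvget : vAt adj u it = (PySem.List.pyGetD adj u ([]:List Int))[it]'hit := by
      rw [hvdef, List.getD_eq_getElem _ _ hit]
    have hvmem : vAt adj u it ∈ adj.getD (nidx adj.length u) [] := by
      rw [← hluG, hvget]; exact List.getElem_mem hit
    have hvr : -(adj.length:Int) ≤ vAt adj u it ∧ vAt adj u it < adj.length :=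
      hR1 _ huR _ hvmem
    have hvR : nidx adj.length (vAt adj u it) ∈ R := hR2 _ huR _ hvmem hvr
    have hv1c : -(cor.length:Int) ≤ vAt adj u it := by rw [hlen]; exact hvr.1
    have hv2c : vAt adj u it < (cor.length:Int) := by rw [hlen]; exact hvr.2
    have hnnv : nidx cor.length (vAt adj u it) = nidx adj.length (vAt adj u it) := by rw [hlen]
    have hkv : nidx adj.length (vAt adj u it) < cor.length := by
      rw [hlen]; exact nidx_lt _ _ hvr.1 hvr.2
    have hcorv : PySem.List.pyGet? cor (vAt adj u it)
        = some (cor.getD (nidx adj.length (vAt adj u it)) 0) := by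
      rw [pyGet?_inrange_getD cor _ 0 hv1c hv2c, hnnv]
    have hdrop : (PySem.List.pyGetD adj u ([]:List Int)).drop it
        = vAt adj u it :: (PySem.List.pyGetD adj u ([]:List Int)).drop (it+1) := by
      rw [List.drop_eq_getElem_cons hit, ← hvget]
    by_cases hc : cor.getD (nidx adj.length (vAt adj u it)) 0 = 0
    · -- discovery: v is white
      have hv0 : PySem.List.pyGet? cor (vAt adj u it) = some 0 := by rw [hcorv, hc]
      have hvisv : PySem.List.pyGet? (visMap cor) (vAt adj u it) = some false := by
        rw [pyGet?_visMap, hcorv, hc]; rfl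
      have hw : whites (PySem.List.pySetD cor (vAt adj u it) 1) < whites cor :=
        whites_pySetD_lt cor _ 1 (by norm_num) hv0
      have hlen1 : (PySem.List.pySetD cor (vAt adj u it) 1).length = adj.length := by
        rw [pySetD_inrange cor _ 1 hv1c hv2c, List.length_set, hlen]
      have hgray1 : (PySem.List.pySetD cor (vAt adj u it) 1).getD
          (nidx adj.length (vAt adj u it)) 0 ≠ 0 := by
        rw [pySetD_inrange cor _ 1 hv1c hv2c, hnnv, getD_set, if_pos ⟨rfl, hkv⟩]
        norm_num
      have hdm := pyGetD_len_le_degMax adj (vAt adj u it)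
      have hm1 : whites (PySem.List.pySetD cor (vAt adj u it) 1) * (degMax adj + 1)
          + ((PySem.List.pyGetD adj (vAt adj u it) ([]:List Int)).length - 0) ≤ m := by
        have hmul : (whites (PySem.List.pySetD cor (vAt adj u it) 1) + 1) * (degMax adj + 1)
            ≤ whites cor * (degMax adj + 1) := Nat.mul_le_mul_right _ hw
        have hexp : (whites (PySem.List.pySetD cor (vAt adj u it) 1) + 1) * (degMax adj + 1)
            = whites (PySem.List.pySetD cor (vAt adj u it) 1) * (degMax adj + 1)
              + (degMax adj + 1) := by ring
        omega
      obtain ⟨cor2, hA1, hV1, hL1, hM1⟩ := ih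
        (PySem.List.pySetD pai (vAt adj u it) u)
        (PySem.List.pySetD nivel (vAt adj u it) (PySem.List.pyGetD nivel u 0 + 1))
        (PySem.List.pySetD cor (vAt adj u it) 1) (vAt adj u it) 0 ((u, it+1)::rest)
        hm1 hlen1 hvr hvR hgray1
      rw [List.drop_zero] at hA1 hV1
      have hgray' : (PySem.List.pySetD cor (vAt adj u it) 1).getD (nidx adj.length u) 0 ≠ 0 := by
        rw [pySetD_inrange cor _ 1 hv1c hv2c, hnnv, getD_set]
        split_ifs with h
        · norm_num
        · exact hgray
      have hgray2 := hM1 _ hgray'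
      have hw2 : whites cor2 ≤ whites (PySem.List.pySetD cor (vAt adj u it) 1) :=
        whites_mono _ _ hL1 hM1
      have hm2 : whites cor2 * (degMax adj + 1)
          + ((PySem.List.pyGetD adj u ([]:List Int)).length - (it+1)) ≤ m := by
        have hmul : (whites cor2 + 1) * (degMax adj + 1) ≤ whites cor * (degMax adj + 1) :=
          Nat.mul_le_mul_right _ (Nat.lt_of_le_of_lt hw2 hw)
        have hexp : (whites cor2 + 1) * (degMax adj + 1)
            = whites cor2 * (degMax adj + 1) + (degMax adj + 1) := by ring
        omega
      obtain ⟨cor3, hA2, hV2, hL2, hM2⟩ := ih _ _ cor2 u (it+1) rest hm2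
        (hL1.trans hlen1) hu huR hgray2
      -- the state after marking v, seen from B's side
      have hstv : PySem.List.pySetD (visMap cor) (vAt adj u it) true
          = visMap (PySem.List.pySetD cor (vAt adj u it) 1) := by
        rw [show (true : Bool) = (fun c : Int => !(c == 0)) 1 by decide]
        exact pySetD_map (fun c : Int => !(c == 0)) cor (vAt adj u it) 1
      have hr1eta : ((visitB adj (vAt adj u it) (PySem.List.pyGetD adj (vAt adj u it) [])
            (PySem.List.pySetD pai (vAt adj u it) u,
             PySem.List.pySetD nivel (vAt adj u it) (PySem.List.pyGetD nivel u 0 + 1),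
             visMap (PySem.List.pySetD cor (vAt adj u it) 1))).val.1,
          (visitB adj (vAt adj u it) (PySem.List.pyGetD adj (vAt adj u it) [])
            (PySem.List.pySetD pai (vAt adj u it) u,
             PySem.List.pySetD nivel (vAt adj u it) (PySem.List.pyGetD nivel u 0 + 1),
             visMap (PySem.List.pySetD cor (vAt adj u it) 1))).val.2.1,
          visMap cor2)
          = (visitB adj (vAt adj u it) (PySem.List.pyGetD adj (vAt adj u it) [])
            (PySem.List.pySetD pai (vAt adj u it) u,
             PySem.List.pySetD nivel (vAt adj u it) (PySem.List.pyGetD nivel u 0 + 1),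
             visMap (PySem.List.pySetD cor (vAt adj u it) 1))).val := by
        rw [hV1]
      refine ⟨cor3, ?_, ?_, hL2.trans (hL1.trans (by rw [pySetD_inrange cor _ 1 hv1c hv2c, List.length_set])), fun k hk => hM2 k (hM1 k (by
        rw [pySetD_inrange cor _ 1 hv1c hv2c, getD_set]
        split_ifs with h
        · norm_num
        · exact hk))⟩
      · rw [dfsA_disc adj u it rest pai nivel cor hit hv0, hA1, hA2, hdrop,
          visitB_cons_false adj u (vAt adj u it) _ _ hvisv, hstv, hr1eta]
      · rw [hV2, hdrop, visitB_cons_false adj u (vAt adj u it) _ _ hvisv, hstv, hr1eta]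
    · -- skip: v already seen
      have hvist : PySem.List.pyGet? (visMap cor) (vAt adj u it) = some true := by
        rw [pyGet?_visMap, hcorv]
        simp only [Option.map_some]
        have hbc : ((cor.getD (nidx adj.length (vAt adj u it)) 0 == 0) : Bool) = false := by
          simp only [beq_eq_false_iff_ne, ne_eq]; exact hc
        rw [hbc]
        rfl
      have hm' : whites cor * (degMax adj + 1)
          + ((PySem.List.pyGetD adj u ([]:List Int)).length - (it+1)) ≤ m := by omega
      obtain ⟨cor2, hA, hV, hL, hM⟩ := ih pai nivel cor u (it+1) rest hm' hlen hu huR hgray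
      refine ⟨cor2, ?_, ?_, hL, hM⟩
      · rw [dfsA_skip adj u it rest pai nivel cor _ hit hcorv hc, hA, hdrop,
          visitB_cons_true adj u (vAt adj u it) _ _ hvist]
      · rw [hV, hdrop, visitB_cons_true adj u (vAt adj u it) _ _ hvist]

-- ===== VERDICT (by name: the statement is the Claim_ definition above) =====

theorem dfs_lista_spec : Claim_equal_dfs_lista := by
  intro adj s _hdom hpre
  unfold Spec_dfs_lista
  obtain ⟨hs, hnb⟩ := hpre
  have hR2 : ∀ u ∈ reachSet adj s, ∀ v ∈ adj.getD u [],
      (-(adj.length:Int) ≤ v ∧ v < adj.length) → nidx adj.length v ∈ reachSet adj s :=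
    fun u hu v hv hr => reachSet_next adj s hs u hu v hv hr
  have hsl : nidx adj.length s < adj.length := nidx_lt _ _ hs.1 hs.2
  have hrepl : -(((List.replicate adj.length (0:Int)).length:Nat):Int) ≤ s
      ∧ s < ((List.replicate adj.length (0:Int)).length:Nat) := by
    rw [List.length_replicate]; exact hs
  have hcor0 : PySem.List.pySetD (List.replicate adj.length (0:Int)) s 1
      = (List.replicate adj.length (0:Int)).set (nidx adj.length s) 1 := by
    rw [pySetD_inrange _ s 1 hrepl.1 hrepl.2, List.length_replicate]
  have hlen0 : (PySem.List.pySetD (List.replicate adj.length (0:Int)) s 1).length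
      = adj.length := by
    rw [hcor0, List.length_set, List.length_replicate]
  have hgray0 : (PySem.List.pySetD (List.replicate adj.length (0:Int)) s 1).getD
      (nidx adj.length s) 0 ≠ 0 := by
    rw [hcor0, getD_set, if_pos ⟨rfl, by rw [List.length_replicate]; exact hsl⟩]
    norm_num
  have hvis0 : PySem.List.pySetD (List.replicate adj.length false) s true
      = visMap (PySem.List.pySetD (List.replicate adj.length (0:Int)) s 1) := by
    have hreplb : -(((List.replicate adj.length false).length:Nat):Int) ≤ s
        ∧ s < ((List.replicate adj.length false).length:Nat) := by
      rw [List.length_replicate]; exact hs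
    rw [pySetD_inrange _ s true hreplb.1 hreplb.2, List.length_replicate,
      hcor0, visMap, List.map_set, List.map_replicate]
    rfl
  obtain ⟨cor2, hA, _, _, _⟩ := main_sim adj (reachSet adj s) hnb hR2
    (whites (PySem.List.pySetD (List.replicate adj.length (0:Int)) s 1) * (degMax adj + 1)
      + ((PySem.List.pyGetD adj s ([]:List Int)).length - 0))
    (List.replicate adj.length (-1:Int))
    (PySem.List.pySetD (List.replicate adj.length (-1:Int)) s 0)
    (PySem.List.pySetD (List.replicate adj.length (0:Int)) s 1)
    s 0 [] (Nat.le_refl _) hlen0 hs (mem_reachSet_self adj s) hgray0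
  rw [List.drop_zero] at hA
  show dfsA adj [(s, 0)] (List.replicate adj.length (-1:Int))
      (PySem.List.pySetD (List.replicate adj.length (-1:Int)) s 0)
      (PySem.List.pySetD (List.replicate adj.length (0:Int)) s 1)
    = dfs_lista_alt adj s
  rw [hA, dfsA_nil, dfs_lista_alt, hvis0]
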